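-- pv_equiv track=rewrite | github.com/Garym3/crypto-DES | CryptoDES/DES.py | get_packets
-- ===== SOURCE A (Python) =====
-- def get_packets(bin_message) :
-- 	packets = dict()
-- 	index = -1
--
-- 	for i in range(0, len(bin_message)) :
-- 		if(i == 0 or i % 64 == 0) :
-- 			index+=1
-- 			packets[index] = dict()
-- 		packets[index][i % 64] = bin_message[i]
--
-- 	nb_packets = len(packets)
-- 	length_last_packet = len(packets[nb_packets - 1])
--
-- 	if(length_last_packet != 64) :
-- 		for i in range (length_last_packet, 64) :
-- 			packets[nb_packets - 1][i] = 0
--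
-- 	return packets
-- ===== SOURCE B (Python) =====
-- def get_packets(bin_message):
--     packets = {}
--     for start in range(0, len(bin_message), 64):
--         chunk = bin_message[start:start + 64]
--         if len(chunk) < 64:
--             chunk = chunk + [0] * (64 - len(chunk))
--         packets[start // 64] = {j: chunk[j] for j in range(64)}
--     return packets
-- ===== Notes on version B (the rewrite author's own statement) =====
-- stated objective: simpler
-- what changed: B replaces A's single flat pass with boundary detection and mutable index/dict state by an outer loop over chunk starts (range(0, n, 64)) that slices each 64-element chunk, pads the last one, and builds each inner dict with a comprehension.
-- outside the precondition, e.g. on get_packets([]): A raises KeyError, B returns {}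
import Mathlib
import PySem

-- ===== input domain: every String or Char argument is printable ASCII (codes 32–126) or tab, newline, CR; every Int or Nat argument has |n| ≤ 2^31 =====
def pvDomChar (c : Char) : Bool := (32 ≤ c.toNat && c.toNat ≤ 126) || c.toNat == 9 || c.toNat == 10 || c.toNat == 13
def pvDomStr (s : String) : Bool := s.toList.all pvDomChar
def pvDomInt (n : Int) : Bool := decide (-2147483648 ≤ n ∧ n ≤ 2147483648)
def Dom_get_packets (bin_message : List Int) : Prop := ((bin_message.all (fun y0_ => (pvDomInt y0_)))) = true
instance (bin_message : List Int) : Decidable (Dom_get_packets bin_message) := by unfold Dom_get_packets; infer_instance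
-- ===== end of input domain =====

-- B replaces A's flat index-tracking pass by chunk slicing with per-chunk padding (simpler decomposition, same cost).

-- ===== PORT A =====
-- loop body of A's 'for i in range(0, len(bin_message))'
def pvStepA (bin_message : List Int) (st : PySem.Dict Int (PySem.Dict Int Int) × Int) (i : Int) :
    PySem.Dict Int (PySem.Dict Int Int) × Int :=
  let (packets, index) :=
    if i == 0 || PySem.Int.mod i 64 == 0 then
      (st.1.insert (st.2 + 1) PySem.Dict.empty, st.2 + 1)
    else (st.1, st.2)
  (packets.modify index PySem.Dict.empty
      (fun d => d.insert (PySem.Int.mod i 64) (PySem.List.pyGetD bin_message i 0)), index)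

def get_packets (bin_message : List Int) : List (Int × List (Int × Int)) :=
  let st := (PySem.List.pyRange 0 bin_message.length 1).foldl (pvStepA bin_message) (PySem.Dict.empty, -1)
  let packets := st.1
  let nb_packets : Int := packets.size
  let length_last_packet : Int := (packets.getD (nb_packets - 1) PySem.Dict.empty).size
  let packets :=
    if length_last_packet != 64 then
      (PySem.List.pyRange length_last_packet 64 1).foldl
        (fun p i => p.modify (nb_packets - 1) PySem.Dict.empty (fun d => d.insert i 0)) packets
    else packets
  packets.items.map (fun p => (p.1, p.2.items))

-- ===== PORT B =====
-- the body of B's loop: one padded 64-bit chunk as a dict {j: chunk[j] for j in range(64)}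
def pvChunkDict (bin_message : List Int) (start : Int) : PySem.Dict Int Int :=
  let chunk := PySem.List.slice bin_message (some start) (some (start + 64))
  let chunk := if chunk.length < 64 then chunk ++ List.replicate (64 - chunk.length) 0 else chunk
  PySem.Dict.ofList ((PySem.List.pyRange 0 64 1).map (fun j => (j, PySem.List.pyGetD chunk j 0)))

def get_packets_alt (bin_message : List Int) : List (Int × List (Int × Int)) :=
  let packets := (PySem.List.pyRange 0 bin_message.length 64).foldl
    (fun (packets : PySem.Dict Int (PySem.Dict Int Int)) start =>
      packets.insert (PySem.Int.floordiv start 64) (pvChunkDict bin_message start))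
    PySem.Dict.empty
  packets.items.map (fun p => (p.1, p.2.items))

-- ===== PRECONDITION & SPEC =====
-- Pre_ excludes only the empty list, on which A raises KeyError(-1) (packets[nb_packets - 1] on an empty dict).
def Pre_get_packets (bin_message : List Int) : Prop := bin_message ≠ []
instance (bin_message : List Int) : Decidable (Pre_get_packets bin_message) := by
  unfold Pre_get_packets; infer_instance
def pvWitness_get_packets : List Int := [1, 0, 1]

def Spec_get_packets (bin_message : List Int) (out : List (Int × List (Int × Int))) : Prop :=
  out = get_packets_alt bin_message
instance (bin_message : List Int) (out : List (Int × List (Int × Int))) : Decidable (Spec_get_packets bin_message out) := by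
  unfold Spec_get_packets; infer_instance

-- ===== CLAIM (what is proved, stated in full; the proofs are below) =====
def Claim_equal_get_packets : Prop := ∀ (bin_message : List Int), Dom_get_packets bin_message →
  Pre_get_packets bin_message → Spec_get_packets bin_message (get_packets bin_message)

-- ===== LEMMAS AND PROOFS =====

-- common normal form: chunk c, position j holds bin[64c+j] (0 beyond the end), (len+63)/64 chunks
def pvInner (l : List Int) (c : Nat) : List (Int × Int) :=
  (List.range 64).map (fun (j : Nat) => ((j : Int), l.getD (64 * c + j) 0))

def pvTarget (l : List Int) : List (Int × List (Int × Int)) :=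
  (List.range ((l.length + 63) / 64)).map (fun (c : Nat) => ((c : Int), pvInner l c))

-- A's dict after processing the first n elements (no padding yet)
def pvPartial (l : List Int) (n : Nat) : PySem.Dict Int (PySem.Dict Int Int) :=
  ⟨(List.range ((n + 63) / 64)).map (fun (c : Nat) => ((c : Int),
    (⟨(List.range (min 64 (n - 64 * c))).map (fun (j : Nat) => ((j : Int), l.getD (64 * c + j) 0))⟩ : PySem.Dict Int Int)))⟩

-- one full chunk, and the generic inner entry
def pvG (l : List Int) (c : Nat) (j : Nat) : Int × Int := ((j : Int), l.getD (64 * c + j) 0)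

def pvFull (l : List Int) (c : Nat) : PySem.Dict Int Int := ⟨(List.range 64).map (pvG l c)⟩

theorem pv_find_append_last {ν : Type} (front : List (Int × ν)) (k : Int) (cur : ν)
    (h : ∀ p ∈ front, p.1 ≠ k) :
    List.find? (fun p => p.1 == k) (front ++ [(k, cur)]) = some (k, cur) := by
  have h1 : List.find? (fun p => p.1 == k) front = none := by
    rw [List.find?_eq_none]; intro p hp; simpa using h p hp
  rw [List.find?_append, h1]; simp

theorem pv_modify_append_last {ν : Type} (front : List (Int × ν)) (k : Int) (cur : ν) (d0 : ν) (f : ν → ν)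
    (h : ∀ p ∈ front, p.1 ≠ k) :
    PySem.Dict.modify ⟨front ++ [(k, cur)]⟩ k d0 f = ⟨front ++ [(k, f cur)]⟩ := by
  have hfind := pv_find_append_last front k cur h
  have hcontains : (PySem.Dict.mk (front ++ [(k, cur)]) : PySem.Dict Int ν).contains k = true := by
    simp [PySem.Dict.contains]
  simp [PySem.Dict.modify, PySem.Dict.insert, PySem.Dict.getD, PySem.Dict.get?, hcontains, hfind]
  clear hfind hcontains
  induction front with
  | nil => rfl
  | cons p rest ih =>
      simp only [List.map_cons]
      rw [if_neg (h p (by simp)), ih (fun q hq => h q (by simp [hq]))]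

theorem pv_keys_ne_range {ν : Type} (m : Nat) (g : Nat → ν) (k : Nat) (hk : m ≤ k) :
    ∀ p ∈ (List.range m).map (fun (j : Nat) => ((j : Int), g j)), p.1 ≠ (k : Int) := by
  intro p hp
  simp only [List.mem_map, List.mem_range] at hp
  obtain ⟨j, hj, rfl⟩ := hp
  simp only [ne_eq, Int.natCast_inj]
  omega

theorem pv_not_contains_range {ν : Type} (m : Nat) (g : Nat → ν) (k : Nat) (hk : m ≤ k) :
    (⟨(List.range m).map (fun (j : Nat) => ((j : Int), g j))⟩ : PySem.Dict Int ν).contains (k : Int) = false := by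
  simp only [PySem.Dict.contains, List.any_eq_false]
  intro p hp
  simpa using pv_keys_ne_range m g k hk p hp

-- pvPartial l n split into full front chunks and a last chunk of r = n - 64*((n-1)/64) entries
theorem pv_partial_split (l : List Int) (n : Nat) (h1 : 1 ≤ n) :
    pvPartial l n = ⟨((List.range ((n - 1) / 64)).map (fun (c : Nat) => ((c : Int), pvFull l c))) ++
      [(((((n - 1) / 64 : Nat)) : Int), (⟨(List.range (n - 64 * ((n - 1) / 64))).map (pvG l ((n - 1) / 64))⟩ : PySem.Dict Int Int))]⟩ := by
  have hch : (n + 63) / 64 = (n - 1) / 64 + 1 := by omega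
  unfold pvPartial
  rw [hch, List.range_succ, List.map_append, List.map_singleton]
  congr 1
  congr 1
  · apply List.map_congr_left
    intro c hc
    simp only [List.mem_range] at hc
    have : min 64 (n - 64 * c) = 64 := by omega
    rw [this]
    rfl
  · have : min 64 (n - 64 * ((n - 1) / 64)) = n - 64 * ((n - 1) / 64) := by omega
    rw [this]
    rfl

-- one iteration of A's loop advances the invariant
theorem pv_stepA_inv (l : List Int) (n : Nat) (h1 : 1 ≤ n) :
    pvStepA l (pvPartial l n, (((n - 1) / 64 : Nat) : Int)) (n : Int) =
      (pvPartial l (n + 1), ((n / 64 : Nat) : Int)) := by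
  have hcond : (((n : Int) == 0 || PySem.Int.mod (n : Int) 64 == 0) = true) ↔ n % 64 = 0 := by
    simp [PySem.Int.mod, Int.fmod_eq_emod]
    omega
  have hmodv : PySem.Int.mod (n : Int) 64 = ((n % 64 : Nat) : Int) := by
    simp [PySem.Int.mod, Int.fmod_eq_emod]
  have hget : PySem.List.pyGetD l (n : Int) 0 = l.getD n 0 := PySem.List.pyGetD_natCast l n 0
  by_cases hmod : n % 64 = 0
  · -- new chunk: n = 64 * q with q = n / 64 = (n-1)/64 + 1
    have hq : n = 64 * (n / 64) := by omega
    have hq1 : (n - 1) / 64 + 1 = n / 64 := by omega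
    unfold pvStepA
    rw [if_pos (hcond.mpr hmod)]
    simp only
    rw [pv_partial_split l n h1]
    have hr64 : n - 64 * ((n - 1) / 64) = 64 := by omega
    rw [hr64]
    -- the dict is (range (n/64)).map pvFull; insert fresh key (n/64)
    have hfront : ((List.range ((n - 1) / 64)).map (fun (c : Nat) => ((c : Int), pvFull l c))) ++
        [(((((n - 1) / 64 : Nat)) : Int), (⟨(List.range 64).map (pvG l ((n - 1) / 64))⟩ : PySem.Dict Int Int))] =
        (List.range (n / 64)).map (fun (c : Nat) => ((c : Int), pvFull l c)) := by
      conv_rhs => rw [← hq1, List.range_succ, List.map_append, List.map_singleton]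
      rfl
    rw [hfront]
    have hkey : ((((n - 1) / 64 : Nat)) : Int) + 1 = ((n / 64 : Nat) : Int) := by omega
    rw [hkey]
    have hins : ((⟨(List.range (n / 64)).map (fun (c : Nat) => ((c : Int), pvFull l c))⟩ :
        PySem.Dict Int (PySem.Dict Int Int)).insert ((n / 64 : Nat) : Int) PySem.Dict.empty) =
        ⟨((List.range (n / 64)).map (fun (c : Nat) => ((c : Int), pvFull l c))) ++
          [((((n / 64 : Nat)) : Int), PySem.Dict.empty)]⟩ := by
      apply PySem.Dict.ext
      rw [PySem.Dict.items_insert_of_not_contains _ _ (pv_not_contains_range _ _ _ (le_refl _))]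
    rw [hins]
    rw [pv_modify_append_last _ _ _ _ _ (pv_keys_ne_range _ _ _ (le_refl _))]
    have hlast : (PySem.Dict.empty.insert (PySem.Int.mod (n : Int) 64) (PySem.List.pyGetD l (n : Int) 0) :
        PySem.Dict Int Int) = ⟨(List.range 1).map (pvG l (n / 64))⟩ := by
      rw [hmodv, hget, hmod]
      apply PySem.Dict.ext
      rw [PySem.Dict.items_insert_of_not_contains _ _ (by rfl)]
      simp [pvG, PySem.Dict.empty, ← hq]
    rw [hlast]
    rw [pv_partial_split l (n + 1) (by omega)]
    have hc1 : (n + 1 - 1) / 64 = n / 64 := by omega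
    rw [hc1]
    rw [show n + 1 - 64 * (n / 64) = 1 by omega]
  · -- same chunk: append position r = n % 64 to the last inner dict
    have hc : (n - 1) / 64 = n / 64 := by omega
    unfold pvStepA
    rw [if_neg (by simp only [hcond]; exact hmod)]
    simp only
    rw [pv_partial_split l n h1]
    have hrr : n - 64 * ((n - 1) / 64) = n % 64 := by omega
    rw [hrr]
    rw [pv_modify_append_last _ _ _ _ _ (pv_keys_ne_range _ _ _ (le_refl _))]
    have hlast : ((⟨(List.range (n % 64)).map (pvG l ((n - 1) / 64))⟩ : PySem.Dict Int Int).insert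
        (PySem.Int.mod (n : Int) 64) (PySem.List.pyGetD l (n : Int) 0)) =
        ⟨(List.range (n % 64 + 1)).map (pvG l ((n - 1) / 64))⟩ := by
      rw [hmodv, hget]
      apply PySem.Dict.ext
      rw [PySem.Dict.items_insert_of_not_contains _ _ (by
        have := pv_not_contains_range (n % 64) (fun j => l.getD (64 * ((n - 1) / 64) + j) 0) (n % 64) (le_refl _)
        simpa [pvG] using this)]
      rw [List.range_succ, List.map_append, List.map_singleton]
      simp only [PySem.Dict.items]
      congr 1
      simp only [pvG]
      rw [show 64 * ((n - 1) / 64) + n % 64 = n from by omega]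
    rw [hlast]
    rw [pv_partial_split l (n + 1) (by omega)]
    have hc1 : (n + 1 - 1) / 64 = n / 64 := by omega
    rw [hc1]
    rw [show n + 1 - 64 * (n / 64) = n % 64 + 1 by omega]
    rw [hc]

theorem pv_loopA (l : List Int) (n : Nat) (h1 : 1 ≤ n) :
    (PySem.List.pyRange 0 (n : Int) 1).foldl (pvStepA l) (PySem.Dict.empty, -1) =
      (pvPartial l n, (((n - 1) / 64 : Nat) : Int)) := by
  induction n with
  | zero => omega
  | succ n ih =>
    by_cases hn : n = 0
    · subst hn
      have hrange : PySem.List.pyRange 0 ((1 : Nat) : Int) 1 = [0] := by decide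
      rw [hrange]
      simp only [List.foldl_cons, List.foldl_nil]
      have hstep : pvStepA l (PySem.Dict.empty, -1) 0 = (pvPartial l 1, 0) := by
        unfold pvStepA
        rw [if_pos (by decide)]
        simp only
        rw [show ((-1 : Int) + 1) = 0 by ring]
        have hins : ((PySem.Dict.empty : PySem.Dict Int (PySem.Dict Int Int)).insert 0 PySem.Dict.empty) =
            ⟨[] ++ [((0 : Int), PySem.Dict.empty)]⟩ := by
          apply PySem.Dict.ext
          rw [PySem.Dict.items_insert_of_not_contains _ _ (by rfl)]
          rfl
        rw [hins, pv_modify_append_last _ _ _ _ _ (by intro p hp; cases hp)]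
        simp only [Prod.mk.injEq, List.nil_append]
        refine ⟨?_, trivial⟩
        apply PySem.Dict.ext
        simp only [pvPartial, PySem.Dict.items]
        norm_num
        apply PySem.Dict.ext
        rw [PySem.Dict.items_insert_of_not_contains _ _ (by rfl)]
        have h0 : PySem.List.pyGetD l ((0 : Nat) : Int) 0 = l.getD 0 0 := PySem.List.pyGetD_natCast l 0 0
        simp only [Nat.cast_zero] at h0
        simp [PySem.Int.mod, PySem.Dict.empty, h0]
      rw [hstep]
      norm_num
    · have hn1 : 1 ≤ n := by omega
      have hsplit : PySem.List.pyRange 0 ((n + 1 : Nat) : Int) 1 =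
          PySem.List.pyRange 0 (n : Int) 1 ++ [(n : Int)] := by
        push_cast
        exact PySem.List.pyRange_one_succ_right (by positivity)
      rw [hsplit, List.foldl_append, ih hn1]
      simp only [List.foldl_cons, List.foldl_nil]
      rw [pv_stepA_inv l n hn1]
      norm_num

theorem pv_getD_append_last {ν : Type} (front : List (Int × ν)) (k : Int) (cur : ν) (d0 : ν)
    (h : ∀ p ∈ front, p.1 ≠ k) :
    (⟨front ++ [(k, cur)]⟩ : PySem.Dict Int ν).getD k d0 = cur := by
  simp [PySem.Dict.getD, PySem.Dict.get?, pv_find_append_last front k cur h]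

theorem pv_insert_range_append (l : List Int) (c m : Nat) (v : Int) :
    ((⟨(List.range m).map (pvG l c)⟩ : PySem.Dict Int Int).insert ((m : Nat) : Int) v) =
      ⟨(List.range m).map (pvG l c) ++ [(((m : Nat) : Int), v)]⟩ := by
  apply PySem.Dict.ext
  rw [PySem.Dict.items_insert_of_not_contains _ _ (by
    have := pv_not_contains_range m (fun j => l.getD (64 * c + j) 0) m (le_refl _)
    simpa [pvG] using this)]

-- padding loop of A: fills positions r..m-1 of the last inner dict with 0
theorem pv_pad (l : List Int) (c : Nat) (front : List (Int × PySem.Dict Int Int))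
    (hfront : ∀ p ∈ front, p.1 ≠ (c : Int)) (r m : Nat) (hrm : r ≤ m)
    (hb : ∀ j, r ≤ j → j < m → l.getD (64 * c + j) 0 = 0) :
    (PySem.List.pyRange (r : Int) (m : Int) 1).foldl
        (fun (p : PySem.Dict Int (PySem.Dict Int Int)) (i : Int) => p.modify (c : Int) PySem.Dict.empty (fun d => d.insert i 0))
        ⟨front ++ [((c : Int), (⟨(List.range r).map (pvG l c)⟩ : PySem.Dict Int Int))]⟩ =
      ⟨front ++ [((c : Int), (⟨(List.range m).map (pvG l c)⟩ : PySem.Dict Int Int))]⟩ := by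
  induction m with
  | zero =>
    have : r = 0 := by omega
    subst this
    rfl
  | succ m ih =>
    by_cases hr : r = m + 1
    · have hempty : PySem.List.pyRange (r : Int) ((m + 1 : Nat) : Int) 1 = [] := by
        rw [hr]
        simp [PySem.List.pyRange_one]
      rw [hempty, List.foldl_nil, hr]
    · have hrm' : r ≤ m := by omega
      have hsplit : PySem.List.pyRange (r : Int) ((m + 1 : Nat) : Int) 1 =
          PySem.List.pyRange (r : Int) (m : Int) 1 ++ [(m : Int)] := by
        push_cast
        exact PySem.List.pyRange_one_succ_right (by exact_mod_cast hrm')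
      rw [hsplit, List.foldl_append, ih hrm' (fun j h1 h2 => hb j h1 (by omega))]
      simp only [List.foldl_cons, List.foldl_nil]
      rw [pv_modify_append_last _ _ _ _ _ hfront]
      congr 2
      rw [pv_insert_range_append]
      rw [List.range_succ, List.map_append, List.map_singleton]
      congr 2
      simp only [pvG]
      rw [hb m hrm' (by omega)]

theorem pv_items_full (l : List Int) (C : Nat) :
    ((⟨(List.range C).map (fun (c : Nat) => ((c : Int), pvFull l c))⟩ :
        PySem.Dict Int (PySem.Dict Int Int))).items.map (fun p => (p.1, p.2.items)) =
      (List.range C).map (fun (c : Nat) => ((c : Int), pvInner l c)) := by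
  simp only [PySem.Dict.items, List.map_map]
  apply List.map_congr_left
  intro c _
  simp [pvFull, pvInner, pvG]

theorem pv_A_eq_target (l : List Int) (h : l ≠ []) : get_packets l = pvTarget l := by
  have hn : 1 ≤ l.length := by
    cases l with
    | nil => exact absurd rfl h
    | cons a t => simp
  unfold get_packets
  simp only
  rw [pv_loopA l l.length hn]
  simp only
  rw [show (pvPartial l l.length).size = (l.length + 63) / 64 from by
    simp [pvPartial, PySem.Dict.size]]
  rw [show ((((l.length + 63) / 64 : Nat) : Int)) - 1 = (((l.length - 1) / 64 : Nat) : Int) from by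
    rw [show (l.length + 63) / 64 = (l.length - 1) / 64 + 1 from by omega]
    push_cast
    ring]
  rw [pv_partial_split l l.length hn]
  rw [pv_getD_append_last _ _ _ _ (pv_keys_ne_range _ _ _ (le_refl _))]
  rw [show (⟨(List.range (l.length - 64 * ((l.length - 1) / 64))).map (pvG l ((l.length - 1) / 64))⟩ :
      PySem.Dict Int Int).size = l.length - 64 * ((l.length - 1) / 64) from by
    simp [PySem.Dict.size]]
  by_cases h64 : l.length % 64 = 0
  · rw [show l.length - 64 * ((l.length - 1) / 64) = 64 from by omega]
    rw [if_neg (by norm_num)]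
    rw [show ((List.range ((l.length - 1) / 64)).map (fun (c' : Nat) => ((c' : Int), pvFull l c'))) ++
        [((((l.length - 1) / 64 : Nat) : Int), (⟨(List.range 64).map (pvG l ((l.length - 1) / 64))⟩ : PySem.Dict Int Int))] =
        (List.range ((l.length - 1) / 64 + 1)).map (fun (c' : Nat) => ((c' : Int), pvFull l c')) from by
      conv_rhs => rw [List.range_succ]
      rw [List.map_append, List.map_singleton]
      rfl]
    rw [pv_items_full]
    unfold pvTarget
    rw [show (l.length + 63) / 64 = (l.length - 1) / 64 + 1 from by omega]
  · rw [if_pos (by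
      simp only [bne_iff_ne, ne_eq]
      omega)]
    rw [show (64 : Int) = ((64 : Nat) : Int) from by norm_num]
    rw [pv_pad l ((l.length - 1) / 64) _ (pv_keys_ne_range _ _ _ (le_refl _))
        (l.length - 64 * ((l.length - 1) / 64)) 64 (by omega)
        (by
          intro j h1 _
          apply List.getD_eq_default
          omega)]
    rw [show ((List.range ((l.length - 1) / 64)).map (fun (c' : Nat) => ((c' : Int), pvFull l c'))) ++
        [((((l.length - 1) / 64 : Nat) : Int), (⟨(List.range 64).map (pvG l ((l.length - 1) / 64))⟩ : PySem.Dict Int Int))] =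
        (List.range ((l.length - 1) / 64 + 1)).map (fun (c' : Nat) => ((c' : Int), pvFull l c')) from by
      conv_rhs => rw [List.range_succ]
      rw [List.map_append, List.map_singleton]
      rfl]
    rw [pv_items_full]
    unfold pvTarget
    rw [show (l.length + 63) / 64 = (l.length - 1) / 64 + 1 from by omega]

theorem pv_chunk_items (l : List Int) (c : Nat) :
    (pvChunkDict l ((64 * c : Nat) : Int)).items = pvInner l c := by
  unfold pvChunkDict
  have hslice : PySem.List.slice l (some ((64 * c : Nat) : Int)) (some (((64 * c : Nat) : Int) + 64)) =
      List.take 64 (List.drop (64 * c) l) := by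
    rw [show (((64 * c : Nat) : Int) + 64) = ((64 * c + 64 : Nat) : Int) by push_cast; ring]
    rw [PySem.List.slice_natCast]
    congr 1
    omega
  rw [hslice]
  set chunk := List.take 64 (List.drop (64 * c) l) with hch
  simp only
  set chunkP := if chunk.length < 64 then chunk ++ List.replicate (64 - chunk.length) 0 else chunk
    with hchP
  have hgd : ∀ j : Nat, j < 64 → PySem.List.pyGetD chunkP ((j : Nat) : Int) 0 = l.getD (64 * c + j) 0 := by
    intro j hj
    rw [PySem.List.pyGetD_natCast]
    have hlen : chunk.length = min 64 (l.length - 64 * c) := by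
      simp [hch]
    by_cases hjc : j < chunk.length
    · have hcp : chunkP.getD j 0 = chunk.getD j 0 := by
        rw [hchP]
        split
        · simp [List.getD_eq_getElem?_getD, List.getElem?_append_left hjc]
        · rfl
      rw [hcp, hch]
      simp only [List.getD_eq_getElem?_getD, List.getElem?_take, List.getElem?_drop]
      simp [hj]
    · have hge : l.length ≤ 64 * c + j := by omega
      have hlt : chunk.length < 64 := by omega
      have hcp : chunkP.getD j 0 = 0 := by
        rw [hchP, if_pos hlt]
        rw [List.getD_eq_getElem?_getD, List.getElem?_append_right (by omega)]
        rw [List.getElem?_replicate, if_pos (by omega)]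
        rfl
      rw [hcp, List.getD_eq_default _ _ (by omega)]
  have hrange : PySem.List.pyRange 0 64 1 = (List.range 64).map (fun (k : Nat) => ((k : Nat) : Int)) := by
    rw [PySem.List.pyRange_one]
    norm_num
    simp
  rw [hrange, List.map_map]
  unfold PySem.Dict.ofList PySem.Dict.update
  rw [PySem.Dict.items_foldl_insert_fresh _ Prod.fst Prod.snd PySem.Dict.empty
      (by intro a _; rfl)
      (by
        rw [List.map_map]
        have : ((fun (p : Int × Int) => p.1) ∘ ((fun j => (j, PySem.List.pyGetD chunkP j 0)) ∘ (fun (k : Nat) => ((k : Nat) : Int)))) =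
            (fun (k : Nat) => ((k : Nat) : Int)) := by
          funext k; rfl
        rw [this]
        exact (List.nodup_range).map (fun a b hab => by exact_mod_cast hab))]
  simp only [PySem.Dict.empty, List.nil_append, List.map_map]
  unfold pvInner
  apply List.map_congr_left
  intro j hj
  simp only [List.mem_range] at hj
  simp only [Function.comp_apply]
  rw [hgd j hj]

theorem pv_B_eq_target (l : List Int) : get_packets_alt l = pvTarget l := by
  cases l with
  | nil => rfl
  | cons a t =>
    set l := a :: t with hl
    have hn : 1 ≤ l.length := by simp [hl]
    unfold get_packets_alt
    simp only
    set C := (l.length + 63) / 64 with hC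
    have hrange : PySem.List.pyRange 0 (l.length : Int) 64 =
        (List.range C).map (fun (k : Nat) => ((64 * k : Nat) : Int)) := by
      rw [PySem.List.pyRange_of_pos 0 (l.length : Int) (by norm_num)]
      rw [if_pos (by exact_mod_cast hn)]
      have : (((l.length : Int) - 0 + 64 - 1) / 64).toNat = C := by omega
      rw [this]
      apply List.map_congr_left
      intro k _
      push_cast
      ring
    rw [hrange, List.foldl_map]
    have hstep : (fun (d : PySem.Dict Int (PySem.Dict Int Int)) (k : Nat) =>
        d.insert (PySem.Int.floordiv ((64 * k : Nat) : Int) 64) (pvChunkDict l ((64 * k : Nat) : Int))) =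
        (fun d k => d.insert ((k : Nat) : Int) (pvChunkDict l ((64 * k : Nat) : Int))) := by
      funext d k
      congr 1
      simp [PySem.Int.floordiv, Int.fdiv_eq_ediv]
    rw [hstep]
    rw [PySem.Dict.items_foldl_insert_fresh (List.range C) (fun (k : Nat) => ((k : Nat) : Int))
        (fun k => pvChunkDict l ((64 * k : Nat) : Int)) PySem.Dict.empty
        (by intro a _; rfl)
        ((List.nodup_range).map (fun a b hab => by exact_mod_cast hab))]
    simp only [PySem.Dict.empty, List.nil_append, List.map_map]
    unfold pvTarget
    rw [← hC]
    apply List.map_congr_left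
    intro k hk
    simp only [Function.comp_apply]
    rw [pv_chunk_items]

-- ===== VERDICT (by name: the statement is the Claim_ definition above) =====
theorem get_packets_spec : Claim_equal_get_packets := by
  intro l _ hpre
  unfold Spec_get_packets
  rw [pv_A_eq_target l hpre, pv_B_eq_target l]
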